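-- pv_equiv track=rewrite | github.com/sylvainvetter/perudo-toolkit | src/perudo/m3/simulator.py | _next_active
-- ===== SOURCE A (Python) =====
-- def _next_active(active_ids: list[int], from_id: int) -> int:
--     """Return the next active player after *from_id* in the circular order."""
--     if not active_ids:
--         return from_id
--     try:
--         idx = active_ids.index(from_id)
--     except ValueError:
--         # from_id was just eliminated — find the closest successor
--         all_ids = sorted(active_ids)
--         for candidate in all_ids:
--             if candidate > from_id:
--                 return candidate
--         return all_ids[0]
--     return active_ids[(idx + 1) % len(active_ids)]
-- ===== SOURCE B (Python) =====
-- def _next_active(active_ids: list[int], from_id: int) -> int: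
--     """Return the next active player after *from_id* in the circular order."""
--     if not active_ids:
--         return from_id
--     try:
--         idx = active_ids.index(from_id)
--     except ValueError:
--         # from_id was just eliminated: smallest strict successor, else global minimum
--         later = [x for x in active_ids if x > from_id]
--         return min(later) if later else min(active_ids)
--     return active_ids[idx + 1] if idx + 1 < len(active_ids) else active_ids[0]
-- ===== Notes on version B (the rewrite author's own statement) =====
-- stated objective: simpler
-- what changed: The eliminated-player fallback no longer sorts the whole list and scans it: B takes min of the strict successors (or the global min), and the wrap-around in the found-index branch is an explicit comparison instead of modulo arithmetic.
import Mathlib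
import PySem

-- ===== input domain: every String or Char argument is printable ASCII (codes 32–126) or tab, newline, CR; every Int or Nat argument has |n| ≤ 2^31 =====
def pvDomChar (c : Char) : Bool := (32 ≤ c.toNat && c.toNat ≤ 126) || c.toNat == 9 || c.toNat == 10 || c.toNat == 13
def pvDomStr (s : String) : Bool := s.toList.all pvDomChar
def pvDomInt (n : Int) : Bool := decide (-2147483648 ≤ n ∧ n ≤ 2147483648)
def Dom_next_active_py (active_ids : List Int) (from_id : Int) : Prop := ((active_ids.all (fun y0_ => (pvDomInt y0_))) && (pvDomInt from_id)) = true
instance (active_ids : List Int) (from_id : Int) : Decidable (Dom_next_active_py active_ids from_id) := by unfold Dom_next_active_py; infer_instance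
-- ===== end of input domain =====

-- B simplifies A's eliminated-player fallback (min over strict successors / global min instead of
-- sort-and-scan) and replaces the modulo wrap-around by an explicit comparison; same return values.

-- ===== PORT A =====
-- the 'for candidate in all_ids: if candidate > from_id: return candidate' loop of A
def pvScanGT : List Int → Int → Option Int
  | [], _ => none
  | c :: rest, f => if f < c then some c else pvScanGT rest f

def next_active_py (active_ids : List Int) (from_id : Int) : Int :=
  if active_ids = [] then from_id
  else
    match PySem.List.index? active_ids from_id with
    | some idx =>
        -- active_ids[(idx + 1) % len(active_ids)]; the index is always in range, getD is never the default
        (PySem.List.pyGet? active_ids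
          (PySem.Int.mod ((idx : Int) + 1) (active_ids.length : Int))).getD from_id
    | none =>
        let all_ids := PySem.List.sorted active_ids (fun x => x) false
        match pvScanGT all_ids from_id with
        | some c => c
        | none => (PySem.List.pyGet? all_ids 0).getD from_id  -- all_ids[0]; nonempty, never the default

-- ===== PORT B =====
def next_active_py_alt (active_ids : List Int) (from_id : Int) : Int :=
  if active_ids = [] then from_id
  else
    match PySem.List.index? active_ids from_id with
    | some idx =>
        if ((idx : Int) + 1) < (active_ids.length : Int) then
          (PySem.List.pyGet? active_ids ((idx : Int) + 1)).getD from_id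
        else
          (PySem.List.pyGet? active_ids 0).getD from_id
    | none =>
        let later := active_ids.filter (fun x => decide (from_id < x))
        if later ≠ [] then (PySem.List.min? later (fun x => x)).getD from_id
        else (PySem.List.min? active_ids (fun x => x)).getD from_id

-- ===== PRECONDITION & SPEC =====
def Spec_next_active_py (active_ids : List Int) (from_id : Int) (out : Int) : Prop := out = next_active_py_alt active_ids from_id
instance (active_ids : List Int) (from_id : Int) (out : Int) : Decidable (Spec_next_active_py active_ids from_id out) := by unfold Spec_next_active_py; infer_instance

-- ===== CLAIM (what is proved, stated in full; the proofs are below) =====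
def Claim_equal_next_active_py : Prop := ∀ (active_ids : List Int) (from_id : Int), Dom_next_active_py active_ids from_id → Spec_next_active_py active_ids from_id (next_active_py active_ids from_id)

-- ===== LEMMAS AND PROOFS =====

lemma pvScanGT_eq_none {s : List Int} {f : Int} :
    pvScanGT s f = none ↔ ∀ y ∈ s, ¬ f < y := by
  induction s with
  | nil => simp [pvScanGT]
  | cons a t ih =>
    by_cases h : f < a
    · simp [pvScanGT, h]
    · simp [pvScanGT, h, ih]
      exact fun _ => not_lt.1 h

lemma pvScanGT_mem_gt {s : List Int} {f c : Int} (h : pvScanGT s f = some c) :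
    c ∈ s ∧ f < c := by
  induction s with
  | nil => simp [pvScanGT] at h
  | cons a t ih =>
    by_cases ha : f < a
    · simp [pvScanGT, ha] at h; subst h; exact ⟨List.mem_cons_self, ha⟩
    · simp [pvScanGT, ha] at h
      obtain ⟨hc, hgt⟩ := ih h
      exact ⟨List.mem_cons_of_mem _ hc, hgt⟩

lemma pvScanGT_min {s : List Int} {f c : Int} (hs : s.Pairwise (· ≤ ·))
    (h : pvScanGT s f = some c) : ∀ y ∈ s, f < y → c ≤ y := by
  induction s with
  | nil => simp [pvScanGT] at h
  | cons a t ih =>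
    have hle : ∀ y ∈ t, a ≤ y := (List.pairwise_cons.1 hs).1
    by_cases ha : f < a
    · simp [pvScanGT, ha] at h; subst h
      intro y hy _
      rcases List.mem_cons.1 hy with rfl | hyt
      · exact le_refl _
      · exact hle y hyt
    · simp [pvScanGT, ha] at h
      intro y hy hfy
      rcases List.mem_cons.1 hy with rfl | hyt
      · exact absurd hfy ha
      · exact ih (List.pairwise_cons.1 hs).2 h y hyt hfy

lemma pvMem_filter_gt {active_ids : List Int} {from_id y : Int} :
    y ∈ active_ids.filter (fun x => decide (from_id < x)) ↔ y ∈ active_ids ∧ from_id < y := by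
  simp [List.mem_filter]

-- ===== VERDICT (by name: the statement is the Claim_ definition above) =====
theorem next_active_py_spec : Claim_equal_next_active_py := by
  intro active_ids from_id _
  unfold Spec_next_active_py next_active_py next_active_py_alt
  by_cases hnil : active_ids = []
  · simp [hnil]
  · simp only [hnil, if_false]
    have hlen : 0 < active_ids.length := List.length_pos_iff.2 hnil
    cases hidx : PySem.List.index? active_ids from_id with
    | some idx =>
      -- idx < length
      obtain ⟨hk, _, _⟩ := PySem.List.getElem_of_index?_eq_some hidx
      have hmod : PySem.Int.mod ((idx : Int) + 1) (active_ids.length : Int)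
          = if ((idx : Int) + 1) < (active_ids.length : Int) then ((idx : Int) + 1) else 0 := by
        rw [PySem.Int.mod_eq_emod_of_pos (by exact_mod_cast hlen)]
        split_ifs with h
        · exact Int.emod_eq_of_lt (by positivity) h
        · have : (idx : Int) + 1 = (active_ids.length : Int) := by
            omega
          simp [this]
      dsimp only
      rw [hmod]
      split_ifs with h <;> rfl
    | none =>
      dsimp only
      have hpw : (PySem.List.sorted active_ids (fun x => x) false).Pairwise (· ≤ ·) :=
        PySem.List.sorted_pairwise active_ids (fun x => x)
      set s := PySem.List.sorted active_ids (fun x => x) false with hs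
      have hmem : ∀ y, y ∈ s ↔ y ∈ active_ids := fun y => PySem.List.mem_sorted active_ids (fun x => x) false y
      by_cases hlater : active_ids.filter (fun x => decide (from_id < x)) = []
      · -- no strict successor
        have hnone : pvScanGT s from_id = none := by
          rw [pvScanGT_eq_none]
          intro y hy hgt
          have : y ∈ active_ids.filter (fun x => decide (from_id < x)) :=
            pvMem_filter_gt.2 ⟨(hmem y).1 hy, hgt⟩
          simp [hlater] at this
        rw [hnone]
        simp only [hlater, ne_eq, not_true_eq_false, if_false]
        -- s[0] = min active_ids
        have hsne : s ≠ [] := by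
          intro h
          exact hnil (by simpa using (PySem.List.sorted_eq_nil_iff active_ids (fun x => x) false).1 (hs ▸ h))
        obtain ⟨h0, t, hst⟩ := List.exists_cons_of_ne_nil hsne
        obtain ⟨m, hm⟩ : ∃ m, PySem.List.min? active_ids (fun x => x) = some m := by
          cases hmin : PySem.List.min? active_ids (fun x => x) with
          | none => exact absurd ((PySem.List.min?_eq_none_iff active_ids (fun x => x)).1 hmin) hnil
          | some m => exact ⟨m, rfl⟩
        rw [hst, hm]
        simp only [PySem.List.pyGet?_zero_cons, Option.getD_some]
        have hmmem : m ∈ active_ids := PySem.List.min?_mem hm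
        have h1 : h0 ≤ m := PySem.List.key_head_sorted_le active_ids (fun x => x) (hs.symm.trans hst) m hmmem
        have h2 : m ≤ h0 := PySem.List.min?_isMin hm h0 ((hmem h0).1 (hst ▸ List.mem_cons_self))
        exact le_antisymm h1 h2
      · -- some strict successor exists
        obtain ⟨m, hm⟩ : ∃ m, PySem.List.min? (active_ids.filter (fun x => decide (from_id < x))) (fun x => x) = some m := by
          cases hmin : PySem.List.min? (active_ids.filter (fun x => decide (from_id < x))) (fun x => x) with
          | none => exact absurd ((PySem.List.min?_eq_none_iff _ (fun x => x)).1 hmin) hlater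
          | some m => exact ⟨m, rfl⟩
        have hmmem := pvMem_filter_gt.1 (PySem.List.min?_mem hm)
        obtain ⟨c, hc⟩ : ∃ c, pvScanGT s from_id = some c := by
          cases hscan : pvScanGT s from_id with
          | none =>
            exact absurd (pvScanGT_eq_none.1 hscan m ((hmem m).2 hmmem.1)) (by simp [hmmem.2])
          | some c => exact ⟨c, rfl⟩
        obtain ⟨hcs, hcgt⟩ := pvScanGT_mem_gt hc
        rw [hc]
        simp only [hlater, ne_eq, not_false_eq_true, if_true, hm, Option.getD_some]
        have h1 : c ≤ m := pvScanGT_min hpw hc m ((hmem m).2 hmmem.1) hmmem.2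
        have h2 : m ≤ c :=
          PySem.List.min?_isMin hm c (pvMem_filter_gt.2 ⟨(hmem c).1 hcs, hcgt⟩)
        exact le_antisymm h1 h2
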